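-- pv_equiv track=rewrite | github.com/odobromyrova/advent-of-code | 2020/scripts/day_5.py | get_seat_row_info
-- ===== SOURCE A (Python) =====
-- def get_seat_row_info(seating_record, n_row_indicating_chars, total_row_number):
--     row_list = [i for i in range(total_row_number)]
--     mid_point = int(total_row_number / 2)
--
--     for char in seating_record[:n_row_indicating_chars]:
--         if char == 'F':
--             row_list = row_list[:mid_point]
--             mid_point = int(len(row_list) / 2)
--
--         if char == 'B':
--             row_list = row_list[mid_point:]
--             mid_point = int(len(row_list) / 2)
--
--     return row_list[0]
-- ===== SOURCE B (Python) =====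
-- def get_seat_row_info(seating_record, n_row_indicating_chars, total_row_number):
--     lo, size = 0, total_row_number
--     for char in seating_record[:n_row_indicating_chars]:
--         if char == 'F':
--             size //= 2
--         elif char == 'B':
--             half = size // 2
--             lo += half
--             size -= half
--     return lo
-- ===== Notes on version B (the rewrite author's own statement) =====
-- stated objective: alternative
-- what changed: B tracks only the interval start and size with O(1) integer arithmetic per character instead of materialising list(range(total_row_number)) and re-slicing it at every step (intended as an asymptotic improvement; a timing run read 1.76x at the largest size but not consistently).
-- outside the precondition, e.g. on get_seat_row_info('FB', 2, 3): A returns 0, B returns 0; on get_seat_row_info('FFF', 3, 6): A raises IndexError, B returns 0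
import Mathlib
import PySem

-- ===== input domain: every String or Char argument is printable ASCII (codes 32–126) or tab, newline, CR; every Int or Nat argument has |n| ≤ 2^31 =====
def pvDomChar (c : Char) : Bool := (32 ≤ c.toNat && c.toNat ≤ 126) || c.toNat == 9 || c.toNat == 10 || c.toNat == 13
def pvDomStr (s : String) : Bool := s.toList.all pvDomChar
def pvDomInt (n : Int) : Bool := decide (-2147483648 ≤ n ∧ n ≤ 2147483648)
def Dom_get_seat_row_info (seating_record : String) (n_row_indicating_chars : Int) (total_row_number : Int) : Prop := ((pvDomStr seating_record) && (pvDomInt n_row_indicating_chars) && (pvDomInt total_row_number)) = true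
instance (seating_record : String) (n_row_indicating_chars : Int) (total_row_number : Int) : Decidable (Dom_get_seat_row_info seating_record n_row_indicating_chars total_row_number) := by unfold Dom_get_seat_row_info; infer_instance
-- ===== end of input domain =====

-- B replaces A's explicit row list and repeated slicing by O(1) arithmetic on the
-- interval start and size (objective: alternative algorithm, avoids building the list).

-- ===== PORT A =====
-- one loop iteration of A: state is (row_list, mid_point)
def pvStepA (st : List Int × Int) (char : Char) : List Int × Int :=
  let st1 :=
    if char = 'F' then
      let row_list := PySem.List.slice st.1 none (some st.2)
      (row_list, Int.tdiv (row_list.length : Int) 2)   -- int(len(row_list)/2); exact, len ≥ 0 ≤ 2^31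
    else st
  if char = 'B' then
    let row_list := PySem.List.slice st1.1 (some st1.2) none
    (row_list, Int.tdiv (row_list.length : Int) 2)
  else st1

def get_seat_row_info (seating_record : String) (n_row_indicating_chars : Int) (total_row_number : Int) : Int :=
  let row_list := PySem.List.pyRange 0 total_row_number 1
  let mid_point := Int.tdiv total_row_number 2         -- int(total_row_number/2); exact for |n| ≤ 2^31
  let st := (PySem.Str.slice seating_record none (some n_row_indicating_chars)).toList.foldl
              pvStepA (row_list, mid_point)
  (PySem.List.pyGet? st.1 0).getD 0                    -- row_list[0]; none (IndexError) excluded by Pre_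

-- ===== PORT B =====
-- one loop iteration of B: state is (lo, size)
def pvStepB (st : Int × Int) (char : Char) : Int × Int :=
  if char = 'F' then (st.1, PySem.Int.floordiv st.2 2)
  else if char = 'B' then
    let half := PySem.Int.floordiv st.2 2
    (st.1 + half, st.2 - half)
  else st

def get_seat_row_info_alt (seating_record : String) (n_row_indicating_chars : Int) (total_row_number : Int) : Int :=
  ((PySem.Str.slice seating_record none (some n_row_indicating_chars)).toList.foldl
      pvStepB (0, total_row_number)).1

-- ===== PRECONDITION & SPEC =====
-- Pre_ excludes inputs on which the repeated halving can empty the row list, where A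
-- raises IndexError on row_list[0]; near the boundary ('B' halvings round up) A
-- sometimes still returns there, and B returns the same value on those inputs too.
def Pre_get_seat_row_info (seating_record : String) (n_row_indicating_chars : Int) (total_row_number : Int) : Prop :=
  (2 : Int) ^ ((PySem.Str.slice seating_record none (some n_row_indicating_chars)).toList.countP
                 (fun c => c == 'F' || c == 'B')) ≤ total_row_number
instance (seating_record : String) (n_row_indicating_chars : Int) (total_row_number : Int) : Decidable (Pre_get_seat_row_info seating_record n_row_indicating_chars total_row_number) := by unfold Pre_get_seat_row_info; infer_instance

def pvWitness_get_seat_row_info : String × Int × Int := ("FBFBBFF", 7, 128)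

def Spec_get_seat_row_info (seating_record : String) (n_row_indicating_chars : Int) (total_row_number : Int) (out : Int) : Prop := out = get_seat_row_info_alt seating_record n_row_indicating_chars total_row_number
instance (seating_record : String) (n_row_indicating_chars : Int) (total_row_number : Int) (out : Int) : Decidable (Spec_get_seat_row_info seating_record n_row_indicating_chars total_row_number out) := by unfold Spec_get_seat_row_info; infer_instance

-- ===== CLAIM (what is proved, stated in full; the proofs are below) =====
def Claim_equal_get_seat_row_info : Prop := ∀ (seating_record : String) (n_row_indicating_chars : Int) (total_row_number : Int), Dom_get_seat_row_info seating_record n_row_indicating_chars total_row_number → Pre_get_seat_row_info seating_record n_row_indicating_chars total_row_number → Spec_get_seat_row_info seating_record n_row_indicating_chars total_row_number (get_seat_row_info seating_record n_row_indicating_chars total_row_number)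

-- ===== LEMMAS AND PROOFS =====

-- Invariant: A's state is (range(lo, lo+size), size // 2) where (lo, size) is B's state,
-- and size stays ≥ 2^(number of F/B chars still to process).
theorem pv_main (chars : List Char) : ∀ (lo size : Int),
    (2 : Int) ^ (chars.countP (fun c => c == 'F' || c == 'B')) ≤ size →
    chars.foldl pvStepA (PySem.List.pyRange lo (lo + size) 1, Int.tdiv size 2)
      = (PySem.List.pyRange (chars.foldl pvStepB (lo, size)).1
           ((chars.foldl pvStepB (lo, size)).1 + (chars.foldl pvStepB (lo, size)).2) 1,
         Int.tdiv (chars.foldl pvStepB (lo, size)).2 2)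
    ∧ 1 ≤ (chars.foldl pvStepB (lo, size)).2 := by
  induction chars with
  | nil =>
      intro lo size h
      simp only [List.countP_nil, pow_zero] at h
      exact ⟨rfl, h⟩
  | cons c cs ih =>
      intro lo size h
      have hcount : (2:Int) ^ ((c :: cs).countP (fun c => c == 'F' || c == 'B'))
          = if (c == 'F' || c == 'B') then 2 * (2:Int) ^ (cs.countP (fun c => c == 'F' || c == 'B')) else (2:Int) ^ (cs.countP (fun c => c == 'F' || c == 'B')) := by
        by_cases hc : (c == 'F' || c == 'B') = true <;> simp [hc, pow_succ, mul_comm]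
      have hpow : (1:Int) ≤ (2:Int) ^ (cs.countP (fun c => c == 'F' || c == 'B')) := one_le_pow₀ (by norm_num)
      have hsize : 1 ≤ size := by
        refine le_trans (le_trans hpow ?_) h
        rw [hcount]; split <;> nlinarith
      obtain ⟨m, hm⟩ : ∃ m, size / 2 = m := ⟨_, rfl⟩
      have hm0 : 0 ≤ m := by omega
      have hmle : m ≤ size := by omega
      have hmid : Int.tdiv size 2 = m := by rw [Int.tdiv_eq_ediv_of_nonneg (by omega), hm]
      have hfd : PySem.Int.floordiv size 2 = m := by
        rw [PySem.Int.floordiv_eq_ediv_of_pos (by norm_num), hm]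
      -- split the range at lo + m
      have hsplit : PySem.List.pyRange lo (lo + size) 1
          = PySem.List.pyRange lo (lo + m) 1 ++ PySem.List.pyRange (lo + m) (lo + size) 1 :=
        PySem.List.pyRange_one_append lo (lo + m) (lo + size) (by omega) (by omega)
      have hlen1 : (PySem.List.pyRange lo (lo + m) 1).length = m.toNat := by
        rw [PySem.List.length_pyRange_one]; omega
      have hlen1' : ((PySem.List.pyRange lo (lo + m) 1).length : Int) = m := by
        rw [hlen1]; omega
      have hlen2' : ((PySem.List.pyRange (lo + m) (lo + size) 1).length : Int) = size - m := by
        rw [PySem.List.length_pyRange_one]; omega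
      have htake : PySem.List.slice (PySem.List.pyRange lo (lo + size) 1) none (some m)
          = PySem.List.pyRange lo (lo + m) 1 := by
        rw [PySem.List.slice_to, hsplit, ← hlen1, List.take_left]
        exact hm0
      have hdrop : PySem.List.slice (PySem.List.pyRange lo (lo + size) 1) (some m) none
          = PySem.List.pyRange (lo + m) (lo + size) 1 := by
        rw [PySem.List.slice_from, hsplit, ← hlen1, List.drop_left]
        exact hm0
      by_cases hF : c = 'F'
      · -- F: keep the lower half, new size = m
        have hstepA : pvStepA (PySem.List.pyRange lo (lo + size) 1, Int.tdiv size 2) c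
            = (PySem.List.pyRange lo (lo + m) 1, Int.tdiv m 2) := by
          have hne : ('F' : Char) ≠ 'B' := by decide
          simp only [pvStepA, hF, hmid, htake, if_neg hne, hlen1']
          simp
        have hstepB : pvStepB (lo, size) c = (lo, m) := by
          simp only [pvStepB, hF, hfd]
          simp
        have hcnt : (2:Int) ^ (cs.countP (fun c => c == 'F' || c == 'B')) ≤ m := by
          rw [hcount] at h; simp [hF] at h; omega
        simp only [List.foldl_cons, hstepA, hstepB]
        exact ih lo m hcnt
      · by_cases hB : c = 'B'
        · -- B: keep the upper half, lo += m, new size = size - m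
          have hne : ('B' : Char) ≠ 'F' := by decide
          have hstepA : pvStepA (PySem.List.pyRange lo (lo + size) 1, Int.tdiv size 2) c
              = (PySem.List.pyRange (lo + m) (lo + size) 1, Int.tdiv (size - m) 2) := by
            subst hB
            simp only [pvStepA, if_pos trivial, if_neg (show ('B':Char) ≠ 'F' by decide),
              hmid, hdrop, hlen2']
          have hstepB : pvStepB (lo, size) c = (lo + m, size - m) := by
            subst hB
            simp only [pvStepB, if_pos trivial, if_neg (show ('B':Char) ≠ 'F' by decide), hfd]
          have hcnt : (2:Int) ^ (cs.countP (fun c => c == 'F' || c == 'B')) ≤ size - m := by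
            rw [hcount] at h; simp [hB] at h; omega
          have hrec := ih (lo + m) (size - m) hcnt
          simp only [List.foldl_cons, hstepA, hstepB]
          have harith : lo + m + (size - m) = lo + size := by ring
          rw [harith] at hrec
          exact hrec
        · -- other char: no change
          have hstepA : pvStepA (PySem.List.pyRange lo (lo + size) 1, Int.tdiv size 2) c
              = (PySem.List.pyRange lo (lo + size) 1, Int.tdiv size 2) := by
            simp only [pvStepA, if_neg hF, if_neg hB]
          have hstepB : pvStepB (lo, size) c = (lo, size) := by
            simp only [pvStepB, if_neg hF, if_neg hB]
          have hcnt : (2:Int) ^ (cs.countP (fun c => c == 'F' || c == 'B')) ≤ size := by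
            rw [hcount] at h; simp [hF, hB] at h; omega
          simp only [List.foldl_cons, hstepA, hstepB]
          exact ih lo size hcnt

-- ===== VERDICT (by name: the statement is the Claim_ definition above) =====
theorem get_seat_row_info_spec : Claim_equal_get_seat_row_info := by
  intro s n t _hdom hpre
  unfold Pre_get_seat_row_info at hpre
  unfold Spec_get_seat_row_info get_seat_row_info_alt
  have hA : get_seat_row_info s n t
      = (PySem.List.pyGet? ((PySem.Str.slice s none (some n)).toList.foldl pvStepA
           (PySem.List.pyRange 0 t 1, Int.tdiv t 2)).1 0).getD 0 := rfl
  rw [hA]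
  obtain ⟨heq, hpos⟩ := pv_main (PySem.Str.slice s none (some n)).toList 0 t hpre
  simp only [zero_add] at heq
  rw [heq]
  have hcons : PySem.List.pyRange ((PySem.Str.slice s none (some n)).toList.foldl pvStepB (0, t)).1
      (((PySem.Str.slice s none (some n)).toList.foldl pvStepB (0, t)).1
        + ((PySem.Str.slice s none (some n)).toList.foldl pvStepB (0, t)).2) 1
      = ((PySem.Str.slice s none (some n)).toList.foldl pvStepB (0, t)).1
        :: PySem.List.pyRange (((PySem.Str.slice s none (some n)).toList.foldl pvStepB (0, t)).1 + 1)
            (((PySem.Str.slice s none (some n)).toList.foldl pvStepB (0, t)).1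
              + ((PySem.Str.slice s none (some n)).toList.foldl pvStepB (0, t)).2) 1 :=
    PySem.List.pyRange_one_cons (by omega)
  rw [hcons, PySem.List.pyGet?_zero_cons, Option.getD_some]
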